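-- pv_equiv track=rewrite | github.com/MichaelTroelsen/SIDDetector-II | scripts/variant_smoke.py | decode
-- ===== SOURCE A (Python) =====
-- def decode(row_bytes):
--     def dec(c):
--         if c in (0x20, 0x00): return " "
--         if 0x01 <= c <= 0x1A: return chr(ord('A') + c - 1)
--         if 0x30 <= c <= 0x39: return chr(c)
--         if c == 0x2E: return "."
--         if c == 0x3A: return ":"
--         if c == 0x2F: return "/"
--         if c == 0x2B: return "+"
--         if c == 0x2D: return "-"
--         return "."
--     return "".join(dec(b) for b in row_bytes).rstrip()
-- ===== SOURCE B (Python) =====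
-- def decode(row_bytes):
--     # Single right-to-left pass: trailing blanks are never emitted, so no rstrip.
--     out = []
--     for c in reversed(row_bytes):
--         if 1 <= c <= 26:
--             ch = chr(64 + c)
--         elif 48 <= c <= 57 or c in (43, 45, 47, 58):
--             ch = chr(c)
--         elif c in (0, 32):
--             ch = " "
--         else:
--             ch = "."
--         if out or ch != " ":
--             out.append(ch)
--     out.reverse()
--     return "".join(out)
-- ===== Notes on version B (the rewrite author's own statement) =====
-- stated objective: alternative
-- what changed: Replaces the per-byte if-cascade returning 1-char strings plus join+rstrip with a single right-to-left pass that maps each byte to a char and skips trailing blanks as it goes, so no rstrip pass is needed.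
import Mathlib
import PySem

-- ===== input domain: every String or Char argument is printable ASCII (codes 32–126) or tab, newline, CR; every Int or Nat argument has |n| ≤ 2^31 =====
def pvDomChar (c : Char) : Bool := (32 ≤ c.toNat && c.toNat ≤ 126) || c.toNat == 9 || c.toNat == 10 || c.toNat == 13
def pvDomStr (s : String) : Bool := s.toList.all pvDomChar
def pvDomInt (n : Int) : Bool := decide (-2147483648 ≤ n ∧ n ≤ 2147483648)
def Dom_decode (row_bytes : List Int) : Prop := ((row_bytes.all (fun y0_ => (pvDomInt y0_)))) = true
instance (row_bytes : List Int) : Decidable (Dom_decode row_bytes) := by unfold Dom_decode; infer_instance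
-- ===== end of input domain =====

-- B replaces A's if-cascade + join + rstrip with one right-to-left pass that skips trailing blanks (alternative, same cost).

-- ===== PORT A =====
-- inner helper 'dec' of A
def decodeDec (c : Int) : String :=
  if c = 32 ∨ c = 0 then " "
  else if 1 ≤ c ∧ c ≤ 26 then String.ofList [Char.ofNat (65 + c - 1).toNat]
  else if 48 ≤ c ∧ c ≤ 57 then String.ofList [Char.ofNat c.toNat]
  else if c = 46 then "."
  else if c = 58 then ":"
  else if c = 47 then "/"
  else if c = 43 then "+"
  else if c = 45 then "-"
  else "."

def decode (row_bytes : List Int) : String :=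
  PySem.Str.rstrip (PySem.Str.join "" (row_bytes.map decodeDec))

-- ===== PORT B =====
-- the per-byte mapping of B's loop body
def decodeAltChar (c : Int) : Char :=
  if 1 ≤ c ∧ c ≤ 26 then Char.ofNat (64 + c).toNat
  else if (48 ≤ c ∧ c ≤ 57) ∨ c = 43 ∨ c = 45 ∨ c = 47 ∨ c = 58 then Char.ofNat c.toNat
  else if c = 0 ∨ c = 32 then ' '
  else '.'

def decode_alt (row_bytes : List Int) : String :=
  String.ofList
    ((row_bytes.reverse.foldl
        (fun out c =>
          let ch := decodeAltChar c
          if out ≠ [] ∨ ch ≠ ' ' then out ++ [ch] else out)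
        []).reverse)

-- ===== PRECONDITION & SPEC =====
def Spec_decode (row_bytes : List Int) (out : String) : Prop := out = decode_alt row_bytes
instance (row_bytes : List Int) (out : String) : Decidable (Spec_decode row_bytes out) := by unfold Spec_decode; infer_instance

-- ===== CLAIM (what is proved, stated in full; the proofs are below) =====
def Claim_equal_decode : Prop := ∀ (row_bytes : List Int), Dom_decode row_bytes → Spec_decode row_bytes (decode row_bytes)

-- ===== LEMMAS AND PROOFS =====

-- A's per-byte string is exactly B's per-byte char
theorem decodeDec_toList (c : Int) : (decodeDec c).toList = [decodeAltChar c] := by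
  unfold decodeDec decodeAltChar
  split_ifs <;> first
    | rfl
    | omega
    | (simp only [String.toList_ofList]; congr 2; omega)
    | (subst_vars; decide)
    | simp

-- B's chars are whitespace exactly when they are the blank
theorem isspace_altChar (c : Int) : PySem.Chars.isspace (decodeAltChar c) = (decodeAltChar c == ' ') := by
  unfold decodeAltChar
  split_ifs with h1 h2 h3
  · obtain ⟨a, b⟩ := h1; interval_cases c <;> decide
  · rcases h2 with ⟨a, b⟩ | h | h | h | h
    · interval_cases c <;> decide
    all_goals subst h; decide
  · decide
  · decide

-- the loop with a nonempty accumulator appends every remaining char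
theorem foldl_ne_nil (r : List Int) (out : List Char) (h : out ≠ []) :
    r.foldl
      (fun out c =>
        let ch := decodeAltChar c
        if out ≠ [] ∨ ch ≠ ' ' then out ++ [ch] else out)
      out = out ++ r.map decodeAltChar := by
  induction r generalizing out with
  | nil => simp
  | cons c r ih =>
    simp only [List.foldl_cons, List.map_cons]
    rw [if_pos (Or.inl h), ih _ (by simp)]
    simp

-- the loop from empty drops the leading blanks
theorem foldl_nil (r : List Int) :
    r.foldl
      (fun out c =>
        let ch := decodeAltChar c
        if out ≠ [] ∨ ch ≠ ' ' then out ++ [ch] else out)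
      [] = (r.map decodeAltChar).dropWhile (· == ' ') := by
  induction r with
  | nil => rfl
  | cons c r ih =>
    simp only [List.foldl_cons, List.map_cons, List.dropWhile_cons]
    by_cases hc : decodeAltChar c = ' '
    · simp [hc, ih]
    · rw [if_pos (Or.inr hc)]
      simp only [List.nil_append]
      rw [foldl_ne_nil _ _ (by simp), if_neg (by simpa using hc)]
      simp

-- dropWhile only looks at predicate values on the list's elements
theorem dropWhile_congr_mem (l : List Char) (p q : Char → Bool)
    (h : ∀ x ∈ l, p x = q x) : l.dropWhile p = l.dropWhile q := by
  induction l with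
  | nil => rfl
  | cons x l ih =>
    simp only [List.dropWhile_cons, h x (by simp)]
    split <;> simp [ih fun y hy => h y (by simp [hy])]

-- ===== VERDICT (by name: the statement is the Claim_ definition above) =====
theorem decode_spec : Claim_equal_decode := by
  intro row_bytes _
  unfold Spec_decode decode decode_alt
  rw [foldl_nil]
  apply String.toList_inj.mp
  simp only [PySem.Str.toList_rstrip, PySem.Str.toList_join, String.toList_ofList,
    List.map_map]
  have hmap : row_bytes.map (String.toList ∘ decodeDec)
      = (row_bytes.map decodeAltChar).map (fun ch => [ch]) := by
    simp [Function.comp, decodeDec_toList]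
  rw [hmap]
  have hjoin := PySem.Chars.join_nil_singletons (row_bytes.map decodeAltChar)
  simp only [String.toList_empty] at *
  rw [hjoin]
  unfold PySem.Chars.rstrip
  rw [List.map_reverse]
  congr 1
  apply dropWhile_congr_mem
  intro x hx
  simp only [List.mem_reverse, List.mem_map] at hx
  obtain ⟨c, _, rfl⟩ := hx
  exact isspace_altChar c
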